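-- pv_equiv track=rewrite | github.com/abhianshi/Natural-Language-Processing | Hidden Markov Model/Viterbi_HMM.py | tokenization_test
-- ===== SOURCE A (Python) =====
-- def tokenization_test(test_string):
--     line_split = test_string.split("\n")
--     test_tokens = []
--     sentence_start_test = []
--     for i in range(len(line_split)):
--         sentence_start_test.append(len(test_tokens))
--         test_tokens.extend(line_split[i].split(" "))
--     return test_tokens, sentence_start_test
-- ===== SOURCE B (Python) =====
-- def tokenization_test(test_string):
--     # single left-to-right character scan: no split() calls at all
--     test_tokens = []
--     sentence_start_test = [0]
--     cur = []
--     for ch in test_string: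
--         if ch == ' ':
--             test_tokens.append(''.join(cur))
--             cur = []
--         elif ch == '\n':
--             test_tokens.append(''.join(cur))
--             cur = []
--             sentence_start_test.append(len(test_tokens))
--         else:
--             cur.append(ch)
--     test_tokens.append(''.join(cur))
--     return test_tokens, sentence_start_test
-- ===== Notes on version B (the rewrite author's own statement) =====
-- stated objective: alternative
-- what changed: B never calls split: it tokenizes in a single character-by-character scan, flushing the current token at each space or newline and recording a start offset at each newline, instead of A's split-by-newline then split-by-space with an interleaved extend loop.
import Mathlib
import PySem

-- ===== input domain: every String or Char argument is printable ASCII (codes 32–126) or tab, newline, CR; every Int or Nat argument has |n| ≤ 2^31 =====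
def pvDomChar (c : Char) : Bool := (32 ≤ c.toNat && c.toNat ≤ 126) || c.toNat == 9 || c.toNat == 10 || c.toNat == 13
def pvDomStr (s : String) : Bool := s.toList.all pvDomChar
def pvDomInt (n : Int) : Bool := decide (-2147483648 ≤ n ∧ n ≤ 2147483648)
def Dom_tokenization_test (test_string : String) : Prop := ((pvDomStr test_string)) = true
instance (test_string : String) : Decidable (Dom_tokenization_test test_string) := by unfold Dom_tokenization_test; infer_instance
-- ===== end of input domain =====

-- B replaces A's split-by-newline / split-by-space loop with a single character scan
-- (alternative decomposition, same asymptotic cost); return values proved equal.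


-- ===== PORT A =====
-- A: split the string on "\n"; one loop over the lines, each step records the current
-- token count, then extends the token list with the line split on " ".
def tokenization_test (test_string : String) : List String × List Int :=
  let lineSplit := (PySem.Str.split? test_string "\n").getD []
  lineSplit.foldl
    (fun (acc : List String × List Int) line =>
      (acc.1 ++ (PySem.Str.split? line " ").getD [], acc.2 ++ [(acc.1.length : Int)]))
    ([], [])

-- ===== PORT B =====
-- B: single character scan; state = (tokens, starts, current-token chars).
def tokenization_test_alt (test_string : String) : List String × List Int :=
  let st := test_string.toList.foldl
    (fun (st : List String × List Int × List Char) ch =>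
      if ch = ' ' then
        (st.1 ++ [String.ofList st.2.2], st.2.1, [])
      else if ch = '\n' then
        let toks := st.1 ++ [String.ofList st.2.2]
        (toks, st.2.1 ++ [(toks.length : Int)], [])
      else
        (st.1, st.2.1, st.2.2 ++ [ch]))
    ([], [0], [])
  (st.1 ++ [String.ofList st.2.2], st.2.1)

-- ===== PRECONDITION & SPEC =====
def Spec_tokenization_test (test_string : String) (out : List String × List Int) : Prop := out = tokenization_test_alt test_string
instance (test_string : String) (out : List String × List Int) : Decidable (Spec_tokenization_test test_string out) := by unfold Spec_tokenization_test; infer_instance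

-- ===== CLAIM (what is proved, stated in full; the proofs are below) =====
def Claim_equal_tokenization_test : Prop := ∀ (test_string : String), Dom_tokenization_test test_string → Spec_tokenization_test test_string (tokenization_test test_string)

-- ===== LEMMAS AND PROOFS =====

-- single-char splitter with an in-order accumulator for the current piece
def pvSplitCh (c : Char) : List Char → List Char → List (List Char)
  | [], cur => [cur]
  | x :: r, cur => if x = c then cur :: pvSplitCh c r [] else pvSplitCh c r (cur ++ [x])

-- the token stream both programs produce, with pending current-token chars `cur`
def pvTks : List Char → List Char → List String
  | [], cur => [String.ofList cur]
  | x :: r, cur =>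
    if x = ' ' then String.ofList cur :: pvTks r []
    else if x = '\n' then String.ofList cur :: pvTks r []
    else pvTks r (cur ++ [x])

-- the start offsets still to be appended, given `n` tokens already emitted
def pvSts : List Char → Int → List Int
  | [], _ => []
  | x :: r, n =>
    if x = ' ' then pvSts r (n + 1)
    else if x = '\n' then (n + 1) :: pvSts r (n + 1)
    else pvSts r n

lemma pvGo_eq (c : Char) : ∀ (cs : List Char) (fuel : Nat) (cur : List Char)
    (acc : List (List Char)), cs.length < fuel →
    PySem.Chars.splitOn.go [c] fuel cs cur acc = acc.reverse ++ pvSplitCh c cs cur.reverse := by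
  intro cs
  induction cs with
  | nil =>
    intro fuel cur acc h
    cases fuel with
    | zero => omega
    | succ f => simp [PySem.Chars.splitOn.go, pvSplitCh]
  | cons x r ih =>
    intro fuel cur acc h
    cases fuel with
    | zero => omega
    | succ f =>
      by_cases hx : x = c
      · subst hx
        simp only [PySem.Chars.splitOn.go, List.isPrefixOf, BEq.rfl, Bool.true_and,
          if_true, List.length_cons, List.drop_succ_cons, List.length_nil, List.drop_zero]
        rw [ih f [] (cur.reverse :: acc) (by simpa using Nat.lt_of_succ_lt_succ h)]
        simp [pvSplitCh]
      · simp only [PySem.Chars.splitOn.go, List.isPrefixOf, Bool.and_eq_true, beq_iff_eq]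
        rw [if_neg (by simp [Ne.symm hx])]
        rw [ih f (x :: cur) acc (by simpa using Nat.lt_of_succ_lt_succ h)]
        simp [pvSplitCh, hx]

lemma pvSplitOn_eq (c : Char) (cs : List Char) :
    PySem.Chars.splitOn cs [c] = pvSplitCh c cs [] := by
  unfold PySem.Chars.splitOn
  rw [pvGo_eq c cs (cs.length + 1) [] [] (by omega)]
  simp

-- splitting a delimiter-free piece
lemma pvSplitCh_no_delim (c : Char) : ∀ (cs cur : List Char),
    (∀ ch ∈ cs, ch ≠ c) → pvSplitCh c cs cur = [cur ++ cs] := by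
  intro cs
  induction cs with
  | nil => intro cur _; simp [pvSplitCh]
  | cons x r ih =>
    intro cur h
    have hx : x ≠ c := h x (by simp)
    simp only [pvSplitCh, if_neg hx]
    rw [ih (cur ++ [x]) (fun ch hm => h ch (by simp [hm]))]
    simp

-- splitting across an explicit delimiter
lemma pvSplitCh_append (c : Char) : ∀ (a b cur : List Char),
    pvSplitCh c (a ++ c :: b) cur = pvSplitCh c a cur ++ pvSplitCh c b [] := by
  intro a
  induction a with
  | nil => intro b cur; simp [pvSplitCh]
  | cons x a' ih =>
    intro b cur
    by_cases hx : x = c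
    · subst hx; simp [pvSplitCh, ih]
    · simp [pvSplitCh, hx, ih]

-- a line made of complete tokens `p` joined by spaces plus a pending token `cur`
def pvJoin (p : List (List Char)) : List Char := p.flatMap (fun t => t ++ [' '])

lemma pvSplitSp_join : ∀ (p : List (List Char)) (cur : List Char),
    (∀ t ∈ p, ∀ ch ∈ t, ch ≠ ' ') → (∀ ch ∈ cur, ch ≠ ' ') →
    pvSplitCh ' ' (pvJoin p ++ cur) [] = p ++ [cur] := by
  intro p
  induction p with
  | nil => intro cur _ hc; simpa [pvJoin] using pvSplitCh_no_delim ' ' cur [] hc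
  | cons t p' ih =>
    intro cur hp hc
    rw [show pvJoin (t :: p') ++ cur = t ++ ' ' :: (pvJoin p' ++ cur) by simp [pvJoin]]
    rw [pvSplitCh_append]
    rw [pvSplitCh_no_delim ' ' t [] (hp t (by simp))]
    rw [ih cur (fun u hu => hp u (by simp [hu])) hc]
    simp

-- characterization of A's fold over the newline split
lemma pvA_char : ∀ (cs : List Char) (p : List (List Char)) (cur : List Char)
    (toks : List String) (starts : List Int),
    (∀ t ∈ p, ∀ ch ∈ t, ch ≠ ' ') → (∀ ch ∈ cur, ch ≠ ' ') →
    ((pvSplitCh '\n' cs (pvJoin p ++ cur)).foldl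
      (fun (acc : List String × List Int) l =>
        (acc.1 ++ (pvSplitCh ' ' l []).map String.ofList, acc.2 ++ [(acc.1.length : Int)]))
      (toks, starts))
    = (toks ++ p.map String.ofList ++ pvTks cs cur,
       starts ++ (toks.length : Int) :: pvSts cs ((toks.length : Int) + p.length)) := by
  intro cs
  induction cs with
  | nil =>
    intro p cur toks starts hp hc
    simp only [pvSplitCh, List.foldl_cons, List.foldl_nil, pvTks, pvSts]
    rw [pvSplitSp_join p cur hp hc]
    simp
  | cons x r ih =>
    intro p cur toks starts hp hc
    by_cases hsp : x = ' '
    · subst hsp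
      rw [show pvSplitCh '\n' (' ' :: r) (pvJoin p ++ cur)
            = pvSplitCh '\n' r (pvJoin (p ++ [cur]) ++ ([] : List Char)) by
          simp [pvSplitCh, pvJoin]]
      rw [ih (p ++ [cur]) [] toks starts
        (by intro t ht ch hch
            rcases List.mem_append.mp ht with h1 | h1
            · exact hp t h1 ch hch
            · simp at h1; subst h1; exact hc ch hch)
        (by simp)]
      refine Prod.ext ?_ ?_
      · simp [pvTks]
      · simp [pvSts]
        ring_nf
    · by_cases hnl : x = '\n'
      · subst hnl
        rw [show pvSplitCh '\n' ('\n' :: r) (pvJoin p ++ cur)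
              = (pvJoin p ++ cur) :: pvSplitCh '\n' r [] by simp [pvSplitCh]]
        rw [List.foldl_cons]
        rw [show pvSplitCh '\n' r [] = pvSplitCh '\n' r (pvJoin [] ++ ([] : List Char)) by
          simp [pvJoin]]
        rw [ih [] [] (toks ++ (pvSplitCh ' ' (pvJoin p ++ cur) []).map String.ofList)
          (starts ++ [(toks.length : Int)]) (by simp) (by simp)]
        rw [pvSplitSp_join p cur hp hc]
        refine Prod.ext ?_ ?_
        · simp [pvTks]
        · simp [pvSts]
          ring_nf
          exact ⟨trivial, trivial⟩
      · rw [show pvSplitCh '\n' (x :: r) (pvJoin p ++ cur)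
              = pvSplitCh '\n' r (pvJoin p ++ (cur ++ [x])) by simp [pvSplitCh, hnl]]
        rw [ih p (cur ++ [x]) toks starts hp
          (by intro ch hch
              rcases List.mem_append.mp hch with h1 | h1
              · exact hc ch h1
              · simp at h1; subst h1; exact hsp)]
        simp [pvTks, pvSts, hsp, hnl]

-- characterization of B's character scan
lemma pvB_char : ∀ (cs : List Char) (toks : List String) (starts : List Int)
    (cur : List Char),
    (let st := cs.foldl
      (fun (st : List String × List Int × List Char) ch =>
        if ch = ' ' then (st.1 ++ [String.ofList st.2.2], st.2.1, [])
        else if ch = '\n' then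
          let toks := st.1 ++ [String.ofList st.2.2]
          (toks, st.2.1 ++ [(toks.length : Int)], [])
        else (st.1, st.2.1, st.2.2 ++ [ch]))
      (toks, starts, cur)
     (st.1 ++ [String.ofList st.2.2], st.2.1))
    = (toks ++ pvTks cs cur, starts ++ pvSts cs (toks.length : Int)) := by
  intro cs
  induction cs with
  | nil => intro toks starts cur; simp [pvTks, pvSts]
  | cons x r ih =>
    intro toks starts cur
    by_cases hsp : x = ' '
    · subst hsp
      rw [List.foldl_cons]
      simp only [reduceIte]
      rw [ih (toks ++ [String.ofList cur]) starts []]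
      simp [pvTks, pvSts]
    · by_cases hnl : x = '\n'
      · subst hnl
        rw [List.foldl_cons]
        simp only [if_neg hsp, reduceIte]
        rw [ih (toks ++ [String.ofList cur])
          (starts ++ [((toks ++ [String.ofList cur]).length : Int)]) []]
        refine Prod.ext ?_ ?_
        · simp [pvTks, hsp]
        · simp [pvSts, hsp]
      · rw [List.foldl_cons]
        simp only [if_neg hsp, if_neg hnl]
        rw [ih toks starts (cur ++ [x])]
        simp [pvTks, pvSts, hsp, hnl]

-- ===== VERDICT (by name: the statement is the Claim_ definition above) =====
theorem tokenization_test_spec : Claim_equal_tokenization_test := by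
  intro s _
  unfold Spec_tokenization_test tokenization_test tokenization_test_alt
  have hB := pvB_char s.toList [] [0] []
  simp only [List.nil_append, List.length_nil, Nat.cast_zero] at hB
  rw [hB]
  have hsplit : (PySem.Str.split? s "\n").getD []
      = (pvSplitCh '\n' s.toList []).map String.ofList := by
    simp [PySem.Str.split?, PySem.Chars.split?, pvSplitOn_eq]
  rw [hsplit]
  rw [List.foldl_map]
  have hfun : (fun (acc : List String × List Int) (l : List Char) =>
      (acc.1 ++ (PySem.Str.split? (String.ofList l) " ").getD [], acc.2 ++ [(acc.1.length : Int)]))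
      = (fun (acc : List String × List Int) l =>
      (acc.1 ++ (pvSplitCh ' ' l []).map String.ofList, acc.2 ++ [(acc.1.length : Int)])) := by
    funext acc l
    simp [PySem.Str.split?, PySem.Chars.split?, pvSplitOn_eq]
  rw [hfun]
  have := pvA_char s.toList [] [] [] [] (by simp) (by simp)
  simpa [pvJoin] using this
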